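-- pv_equiv track=rewrite | github.com/dpinney/omf | omf/scratch/blackstart/flisr.py | getMaxSubtree
-- ===== SOURCE A (Python) =====
-- def getMaxSubtree(graph, start):
-- 	'helper function that returns all the nodes connected to a starting node in a graph'
-- 	visited, stack = set(), [start]
-- 	while stack:
-- 		vertex = stack.pop()
-- 		if vertex not in visited:
-- 			visited.add(vertex)
-- 			stack.extend(graph[vertex] - visited)
-- 	return visited
-- ===== SOURCE B (Python) =====
-- def getMaxSubtree(graph, start):
-- 	'helper function that returns all the nodes connected to a starting node in a graph'
-- 	visited = {start}
-- 	frontier = {start}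
-- 	while frontier:
-- 		frontier = set().union(*(graph[v] for v in frontier)) - visited
-- 		visited |= frontier
-- 	return visited
-- ===== Notes on version B (the rewrite author's own statement) =====
-- stated objective: alternative
-- what changed: A's explicit-stack DFS with per-pop visited checks is replaced by a level-synchronous frontier saturation (BFS rounds): each iteration looks up all frontier vertices at once, subtracts visited, and merges the new level, so there is no stack and no revisiting of stale stack entries; the returned set is identical.
-- outside the precondition, e.g. on getMaxSubtree({'a': set(), 'b': {'c'}}, 'a'): A returns {'a'}, B returns {'a'}
import Mathlib
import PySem

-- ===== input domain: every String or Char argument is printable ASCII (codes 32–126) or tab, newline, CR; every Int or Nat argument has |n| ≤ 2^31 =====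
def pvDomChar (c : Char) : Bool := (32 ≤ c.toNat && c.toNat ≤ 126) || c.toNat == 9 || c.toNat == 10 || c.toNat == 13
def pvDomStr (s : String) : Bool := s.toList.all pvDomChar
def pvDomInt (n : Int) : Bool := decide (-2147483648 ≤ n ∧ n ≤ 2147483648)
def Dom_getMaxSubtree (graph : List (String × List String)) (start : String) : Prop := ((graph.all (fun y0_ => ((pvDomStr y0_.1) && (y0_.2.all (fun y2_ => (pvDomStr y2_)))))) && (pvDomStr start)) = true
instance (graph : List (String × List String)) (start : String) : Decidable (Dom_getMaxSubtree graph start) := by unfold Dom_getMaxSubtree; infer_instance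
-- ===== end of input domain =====

-- B replaces A's explicit-stack DFS by a frontier-saturation (level-by-level BFS) loop with no stack;
-- the Python result is a set (unordered), so both ports return its canonical sorted list of distinct elements.

-- all strings occurring in the graph (keys and neighbours); used only for the termination measures
def pvUniv (graph : List (String × List String)) : List String :=
  graph.flatMap (fun p => p.1 :: p.2)

def pvCnt (graph : List (String × List String)) (visited : List String) : Nat :=
  ((pvUniv graph).filter (fun x => decide (x ∉ visited))).length

-- termination/lookup helpers (cited by the ports' decreasing_by and the proofs below)

theorem pvFilterNotMemLt {l v w : List String} {a : String}
    (hal : a ∈ l) (hav : a ∉ v) (haw : a ∈ w) (hvw : ∀ x ∈ v, x ∈ w) :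
    (l.filter (fun x => decide (x ∉ w))).length < (l.filter (fun x => decide (x ∉ v))).length := by
  simp only [decide_not]
  have hmono : ∀ l' : List String,
      (l'.filter (fun x => !decide (x ∈ w))).length ≤ (l'.filter (fun x => !decide (x ∈ v))).length := by
    intro l'
    exact (List.monotone_filter_right l' (by intro x hx; simp at *; tauto)).length_le
  induction l with
  | nil => simp at hal
  | cons b t ih =>
    by_cases hb : a = b
    · subst hb
      have := hmono t
      simp [hav, haw]
      omega
    · have hat : a ∈ t := by cases hal with | head => exact absurd rfl hb | tail _ h => exact h
      have h1 := ih hat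
      by_cases hbw : b ∈ w
      · by_cases hbv : b ∈ v
        · simp [hbw, hbv]; omega
        · simp [hbw, hbv]; omega
      · have hbv : b ∉ v := fun h => hbw (hvw b h)
        simp [hbw, hbv]; omega

theorem pvDiffLenLe (s t : List String) : (PySem.Set.diff s t).length ≤ s.length := by
  simp [PySem.Set.diff]
  exact List.length_filter_le _ _

theorem pvKeyMemUniv {graph : List (String × List String)} {k : String} {ns : List String}
    (h : (k, ns) ∈ graph) : k ∈ (graph.flatMap (fun p => p.1 :: p.2)) := by
  exact List.mem_flatMap.2 ⟨(k, ns), h, List.mem_cons_self ..⟩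

theorem pvValLenLe {graph : List (String × List String)} {k : String} {ns : List String}
    (h : (k, ns) ∈ graph) : ns.length ≤ (graph.flatMap (fun p => p.1 :: p.2)).length := by
  induction graph with
  | nil => simp at h
  | cons p t ih =>
    simp only [List.flatMap_cons, List.length_append]
    cases h with
    | head => simp; omega
    | tail _ h => have := ih h; omega

theorem pvLookupMem {graph : List (String × List String)} {k : String} {ns : List String}
    (h : List.lookup k graph = some ns) : (k, ns) ∈ graph := by
  induction graph with
  | nil => simp [List.lookup] at h
  | cons p t ih =>
    rw [List.lookup] at h
    by_cases he : k = p.1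
    · simp [he] at h; subst h
      have : p = (k, p.2) := by ext <;> simp [he]
      rw [← this]; exact List.mem_cons_self ..
    · simp [show (k == p.1) = false by simp [he]] at h
      exact List.mem_cons_of_mem _ (ih h)

-- ===== PORT A =====
def loopA (graph : List (String × List String)) (visited stack : List String) : List String :=
  if hs : stack = [] then visited
  else  -- vertex = stack.pop() is stack.getLast hs, the remaining stack is stack.dropLast
    if hv : stack.getLast hs ∈ visited then loopA graph visited stack.dropLast
    else
      match hl : List.lookup (stack.getLast hs) graph with
      | none => PySem.Set.add visited (stack.getLast hs)   -- Python raises KeyError here (excluded by Pre_)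
      | some ns =>
          loopA graph (PySem.Set.add visited (stack.getLast hs))
            (stack.dropLast ++
              PySem.Set.diff (PySem.Set.ofList ns) (PySem.Set.add visited (stack.getLast hs)))
termination_by pvCnt graph visited * ((pvUniv graph).length + 1) + stack.length
decreasing_by
  · simp only [List.length_dropLast]
    have h0 : 0 < stack.length := List.length_pos_of_ne_nil hs
    omega
  · have hmem : (stack.getLast hs, ns) ∈ graph := pvLookupMem hl
    have hcnt : pvCnt graph (PySem.Set.add visited (stack.getLast hs)) + 1 ≤ pvCnt graph visited := by
      unfold pvCnt
      rw [PySem.Set.add_of_not_mem hv]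
      exact pvFilterNotMemLt (pvKeyMemUniv hmem) hv (by simp) (fun x hx => by simp [hx])
    have h2 := Nat.mul_le_mul_right ((pvUniv graph).length + 1) hcnt
    rw [Nat.add_mul, Nat.one_mul] at h2
    have hdiff : (PySem.Set.diff (PySem.Set.ofList ns) (PySem.Set.add visited (stack.getLast hs))).length
        ≤ (pvUniv graph).length :=
      le_trans (pvDiffLenLe _ _) (le_trans (PySem.Set.length_ofList_le ns) (pvValLenLe hmem))
    have h0 : 0 < stack.length := List.length_pos_of_ne_nil hs
    simp only [List.length_append, List.length_dropLast]
    omega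

def getMaxSubtree (graph : List (String × List String)) (start : String) : List String :=
  PySem.List.sorted (loopA graph [] [start]) (fun x => x) false

-- ===== PORT B =====
-- union of graph[v] over v in frontier; none = some lookup raises KeyError
def pvNbrs? (graph : List (String × List String)) : List String → Option (List String)
  | [] => some []
  | v :: rest =>
    match List.lookup v graph, pvNbrs? graph rest with
    | some ns, some acc => some (ns ++ acc)
    | _, _ => none

theorem pvNbrsMemUniv {graph : List (String × List String)} {fr uni : List String}
    (h : pvNbrs? graph fr = some uni) : ∀ x ∈ uni, x ∈ pvUniv graph := by
  induction fr generalizing uni with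
  | nil => simp [pvNbrs?] at h; subst h; simp
  | cons v rest ih =>
    rw [pvNbrs?] at h
    cases hl : List.lookup v graph with
    | none => rw [hl] at h; simp at h
    | some ns =>
      rw [hl] at h
      cases hr : pvNbrs? graph rest with
      | none => rw [hr] at h; simp at h
      | some acc =>
        rw [hr] at h; simp at h; subst h
        intro x hx
        rcases List.mem_append.1 hx with hx | hx
        · exact List.mem_flatMap.2 ⟨(v, ns), pvLookupMem hl, List.mem_cons_of_mem _ hx⟩
        · exact ih hr x hx

def loopB (graph : List (String × List String)) (visited frontier : List String) : List String :=
  if frontier = [] then visited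
  else
    match hu : pvNbrs? graph frontier with
    | none => visited   -- Python raises KeyError here (excluded by Pre_)
    | some uni =>  -- newF = union(graph[v] for v in frontier) - visited
      loopB graph (PySem.Set.update visited (PySem.Set.diff (PySem.Set.ofList uni) visited))
        (PySem.Set.diff (PySem.Set.ofList uni) visited)
termination_by (pvCnt graph visited, frontier.length)
decreasing_by
  cases hnf : PySem.Set.diff (PySem.Set.ofList uni) visited with
  | nil =>
    rw [PySem.Set.update_nil]
    exact Prod.Lex.right _ (List.length_pos_of_ne_nil (by assumption))
  | cons n t =>
    apply Prod.Lex.left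
    have hn : n ∈ PySem.Set.diff (PySem.Set.ofList uni) visited := by rw [hnf]; exact List.mem_cons_self ..
    have hn' := (PySem.Set.mem_diff _ _ _).1 hn
    unfold pvCnt
    exact pvFilterNotMemLt (pvNbrsMemUniv hu n ((PySem.Set.mem_ofList _ _).1 hn'.1)) hn'.2
      ((PySem.Set.mem_update _ _ _).2 (Or.inr (hnf ▸ hn))) (fun x hx => (PySem.Set.mem_update _ _ _).2 (Or.inl hx))

def getMaxSubtree_alt (graph : List (String × List String)) (start : String) : List String :=
  PySem.List.sorted (loopB graph [start] [start]) (fun x => x) false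

-- ===== PRECONDITION & SPEC =====
-- Pre_ excludes the inputs where an adjacency lookup can raise KeyError: it requires start and every
-- listed neighbour of every key to be a key. This checkable condition is slightly stronger than the exact
-- raising condition "some reachable vertex has no adjacency entry", so it also excludes graphs whose only
-- dangling neighbours sit in parts unreachable from start, on which A returns (and B returns the same set).
def Pre_getMaxSubtree (graph : List (String × List String)) (start : String) : Prop :=
  start ∈ graph.map Prod.fst ∧ ∀ p ∈ graph, ∀ n ∈ p.2, n ∈ graph.map Prod.fst
instance (graph : List (String × List String)) (start : String) : Decidable (Pre_getMaxSubtree graph start) := by unfold Pre_getMaxSubtree; infer_instance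

def pvWitness_getMaxSubtree : (List (String × List String)) × String :=
  ([("a", ["b"]), ("b", [])], "a")

def Spec_getMaxSubtree (graph : List (String × List String)) (start : String) (out : List String) : Prop := out = getMaxSubtree_alt graph start
instance (graph : List (String × List String)) (start : String) (out : List String) : Decidable (Spec_getMaxSubtree graph start out) := by unfold Spec_getMaxSubtree; infer_instance

-- ===== CLAIM (what is proved, stated in full; the proofs are below) =====
def Claim_equal_getMaxSubtree : Prop := ∀ (graph : List (String × List String)) (start : String), Dom_getMaxSubtree graph start → Pre_getMaxSubtree graph start → Spec_getMaxSubtree graph start (getMaxSubtree graph start)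

-- ===== LEMMAS AND PROOFS =====

-- reachability from start: what both loops compute (as a set)
inductive pvReach (graph : List (String × List String)) (start : String) : String → Prop
  | base : pvReach graph start start
  | step {u n : String} {ns : List String} :
      pvReach graph start u → List.lookup u graph = some ns → n ∈ ns → pvReach graph start n


theorem pvLookupOfMemKeys {graph : List (String × List String)} {k : String}
    (h : k ∈ graph.map Prod.fst) : ∃ ns, List.lookup k graph = some ns := by
  induction graph with
  | nil => simp at h
  | cons p t ih =>
    by_cases he : k = p.1
    · exact ⟨p.2, by simp [List.lookup, he]⟩
    · simp [List.map_cons] at h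
      rcases h with h | h
      · exact absurd h he
      · obtain ⟨ns, hns⟩ := ih (by simpa using h)
        exact ⟨ns, by simp [List.lookup, show (k == p.1) = false by simp [he], hns]⟩

theorem pvNbrsSound {graph : List (String × List String)} {fr uni : List String}
    (h : pvNbrs? graph fr = some uni) :
    ∀ x ∈ uni, ∃ v ∈ fr, ∃ ns, List.lookup v graph = some ns ∧ x ∈ ns := by
  induction fr generalizing uni with
  | nil => simp [pvNbrs?] at h; subst h; simp
  | cons v rest ih =>
    rw [pvNbrs?] at h
    cases hl : List.lookup v graph with
    | none => rw [hl] at h; simp at h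
    | some ns =>
      rw [hl] at h
      cases hr : pvNbrs? graph rest with
      | none => rw [hr] at h; simp at h
      | some acc =>
        rw [hr] at h; simp at h; subst h
        intro x hx
        rcases List.mem_append.1 hx with hx | hx
        · exact ⟨v, List.mem_cons_self .., ns, hl, hx⟩
        · obtain ⟨w, hw, ns', hns', hx'⟩ := ih hr x hx
          exact ⟨w, List.mem_cons_of_mem _ hw, ns', hns', hx'⟩

theorem pvNbrsComplete {graph : List (String × List String)} {fr uni : List String}
    (h : pvNbrs? graph fr = some uni) :
    ∀ v ∈ fr, ∀ ns, List.lookup v graph = some ns → ∀ n ∈ ns, n ∈ uni := by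
  induction fr generalizing uni with
  | nil => simp
  | cons v rest ih =>
    rw [pvNbrs?] at h
    cases hl : List.lookup v graph with
    | none => rw [hl] at h; simp at h
    | some ns =>
      rw [hl] at h
      cases hr : pvNbrs? graph rest with
      | none => rw [hr] at h; simp at h
      | some acc =>
        rw [hr] at h; simp at h; subst h
        intro w hw ns' hns' n hn
        rcases List.mem_cons.1 hw with hw | hw
        · subst hw; rw [hl] at hns'; injection hns' with e; subst e
          exact List.mem_append_left _ hn
        · exact List.mem_append_right _ (ih hr w hw ns' hns' n hn)

theorem pvNbrsTotal {graph : List (String × List String)} {fr : List String}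
    (h : ∀ v ∈ fr, v ∈ graph.map Prod.fst) : ∃ uni, pvNbrs? graph fr = some uni := by
  induction fr with
  | nil => exact ⟨[], rfl⟩
  | cons v rest ih =>
    obtain ⟨ns, hns⟩ := pvLookupOfMemKeys (h v (List.mem_cons_self ..))
    obtain ⟨acc, hacc⟩ := ih (fun w hw => h w (List.mem_cons_of_mem _ hw))
    exact ⟨ns ++ acc, by rw [pvNbrs?, hns, hacc]⟩

theorem loopA_inv (graph : List (String × List String)) (start : String)
    (hpre : ∀ p ∈ graph, ∀ n ∈ p.2, n ∈ graph.map Prod.fst) :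
    ∀ visited stack,
      visited.Nodup →
      (∀ x ∈ visited, x ∈ graph.map Prod.fst) →
      (∀ x ∈ stack, x ∈ graph.map Prod.fst) →
      (∀ x ∈ visited, pvReach graph start x) →
      (∀ x ∈ stack, pvReach graph start x) →
      (∀ v ∈ visited, ∀ ns, List.lookup v graph = some ns → ∀ n ∈ ns, n ∈ visited ∨ n ∈ stack) →
      (start ∈ visited ∨ start ∈ stack) →
      (loopA graph visited stack).Nodup ∧
      (∀ x ∈ loopA graph visited stack, pvReach graph start x) ∧
      start ∈ loopA graph visited stack ∧
      (∀ v ∈ loopA graph visited stack, ∀ ns, List.lookup v graph = some ns →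
        ∀ n ∈ ns, n ∈ loopA graph visited stack) := by
  intro visited stack
  induction visited, stack using loopA.induct graph with
  | case1 visited =>
    intro hnd hvk _ hvr _ hcl hst
    rw [loopA, dif_pos rfl]
    refine ⟨hnd, hvr, ?_, ?_⟩
    · rcases hst with h | h
      · exact h
      · simp at h
    · intro v hv ns hns n hn
      rcases hcl v hv ns hns n hn with h | h
      · exact h
      · simp at h
  | case2 visited stack hs hv ih =>
    intro hnd hvk hsk hvr hsr hcl hst
    have hmem_stack : ∀ x ∈ stack.dropLast, x ∈ stack := fun x hx =>
      (List.dropLast_sublist stack).subset hx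
    have hsplit : stack = stack.dropLast ++ [stack.getLast hs] :=
      (List.dropLast_append_getLast hs).symm
    have hstep : ∀ n, n ∈ stack → n ∈ stack.dropLast ∨ n = stack.getLast hs := by
      intro n hn
      rw [hsplit] at hn
      rcases List.mem_append.1 hn with h | h
      · exact Or.inl h
      · exact Or.inr (by simpa using h)
    rw [loopA, dif_neg hs, dif_pos hv]
    apply ih hnd hvk (fun x hx => hsk x (hmem_stack x hx)) hvr
      (fun x hx => hsr x (hmem_stack x hx))
    · intro v hvv ns hns n hn
      rcases hcl v hvv ns hns n hn with h | h
      · exact Or.inl h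
      · rcases hstep n h with h | h
        · exact Or.inr h
        · exact Or.inl (h ▸ hv)
    · rcases hst with h | h
      · exact Or.inl h
      · rcases hstep start h with h | h
        · exact Or.inr h
        · exact Or.inl (h ▸ hv)
  | case3 visited stack hs hv hl =>
    intro _ _ hsk _ _ _ _
    exfalso
    obtain ⟨ns, hns⟩ := pvLookupOfMemKeys (hsk _ (List.getLast_mem hs))
    rw [hns] at hl
    simp at hl
  | case4 visited stack hs hv ns hl ih =>
    intro hnd hvk hsk hvr hsr hcl hst
    have hvmem : (stack.getLast hs, ns) ∈ graph := pvLookupMem hl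
    have hvk' : stack.getLast hs ∈ graph.map Prod.fst := hsk _ (List.getLast_mem hs)
    have hvr' : pvReach graph start (stack.getLast hs) := hsr _ (List.getLast_mem hs)
    have hmem_stack : ∀ x ∈ stack.dropLast, x ∈ stack := fun x hx =>
      (List.dropLast_sublist stack).subset hx
    have hsplit : stack = stack.dropLast ++ [stack.getLast hs] :=
      (List.dropLast_append_getLast hs).symm
    have hstep : ∀ n, n ∈ stack → n ∈ stack.dropLast ∨ n = stack.getLast hs := by
      intro n hn
      rw [hsplit] at hn
      rcases List.mem_append.1 hn with h | h
      · exact Or.inl h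
      · exact Or.inr (by simpa using h)
    have hmem_add : ∀ x, x ∈ PySem.Set.add visited (stack.getLast hs) ↔
        x ∈ visited ∨ x = stack.getLast hs := fun x => PySem.Set.mem_add _ _ _
    have hdiff : ∀ x, x ∈ PySem.Set.diff (PySem.Set.ofList ns) (PySem.Set.add visited (stack.getLast hs)) ↔
        x ∈ PySem.Set.ofList ns ∧ x ∉ PySem.Set.add visited (stack.getLast hs) :=
      fun x => PySem.Set.mem_diff _ _ _
    have hgoal : loopA graph visited stack =
        loopA graph (PySem.Set.add visited (stack.getLast hs))
          (stack.dropLast ++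
            PySem.Set.diff (PySem.Set.ofList ns) (PySem.Set.add visited (stack.getLast hs))) := by
      rw [loopA, dif_neg hs, dif_neg hv]
      split
      · rename_i hl'
        rw [hl] at hl'
        simp at hl'
      · rename_i ns' hl'
        rw [hl] at hl'
        injection hl' with e
        subst e
        rfl
    rw [hgoal]
    apply ih
    · exact PySem.Set.nodup_add _ _ hnd
    · intro x hx
      rcases (hmem_add x).1 hx with h | h
      · exact hvk x h
      · exact h ▸ hvk'
    · intro x hx
      rcases List.mem_append.1 hx with h | h
      · exact hsk x (hmem_stack x h)
      · have := ((hdiff x).1 h).1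
        exact hpre _ hvmem x ((PySem.Set.mem_ofList _ _).1 this)
    · intro x hx
      rcases (hmem_add x).1 hx with h | h
      · exact hvr x h
      · exact h ▸ hvr'
    · intro x hx
      rcases List.mem_append.1 hx with h | h
      · exact hsr x (hmem_stack x h)
      · have := ((hdiff x).1 h).1
        exact pvReach.step hvr' hl ((PySem.Set.mem_ofList _ _).1 this)
    · intro v hvv nsv hnsv n hn
      rcases (hmem_add v).1 hvv with h | h
      · rcases hcl v h nsv hnsv n hn with h2 | h2
        · exact Or.inl ((hmem_add n).2 (Or.inl h2))
        · rcases hstep n h2 with h3 | h3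
          · exact Or.inr (List.mem_append_left _ h3)
          · exact Or.inl ((hmem_add n).2 (Or.inr h3))
      · subst h
        rw [hl] at hnsv
        injection hnsv with e
        subst e
        by_cases hnn : n ∈ PySem.Set.add visited (stack.getLast hs)
        · exact Or.inl hnn
        · exact Or.inr (List.mem_append_right _
            ((hdiff n).2 ⟨(PySem.Set.mem_ofList _ _).2 hn, hnn⟩))
    · rcases hst with h | h
      · exact Or.inl ((hmem_add start).2 (Or.inl h))
      · rcases hstep start h with h2 | h2
        · exact Or.inr (List.mem_append_left _ h2)
        · exact Or.inl ((hmem_add start).2 (Or.inr h2))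

theorem loopB_inv (graph : List (String × List String)) (start : String)
    (hpre : ∀ p ∈ graph, ∀ n ∈ p.2, n ∈ graph.map Prod.fst) :
    ∀ visited frontier,
      visited.Nodup →
      (∀ x ∈ visited, x ∈ graph.map Prod.fst) →
      (∀ x ∈ frontier, x ∈ visited) →
      (∀ x ∈ visited, pvReach graph start x) →
      (∀ v ∈ visited, ∀ ns, List.lookup v graph = some ns → ∀ n ∈ ns, n ∈ visited ∨ v ∈ frontier) →
      start ∈ visited →
      (loopB graph visited frontier).Nodup ∧
      (∀ x ∈ loopB graph visited frontier, pvReach graph start x) ∧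
      start ∈ loopB graph visited frontier ∧
      (∀ v ∈ loopB graph visited frontier, ∀ ns, List.lookup v graph = some ns →
        ∀ n ∈ ns, n ∈ loopB graph visited frontier) := by
  intro visited frontier
  induction visited, frontier using loopB.induct graph with
  | case1 visited =>
    intro hnd hvk _ hvr hcl hst
    rw [loopB, if_pos rfl]
    refine ⟨hnd, hvr, hst, ?_⟩
    intro v hv ns hns n hn
    rcases hcl v hv ns hns n hn with h | h
    · exact h
    · simp at h
  | case2 visited frontier hf hu =>
    intro _ hvk hfv _ _ _
    exfalso
    obtain ⟨uni, huni⟩ := pvNbrsTotal (fun v hv => hvk v (hfv v hv))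
    rw [huni] at hu
    simp at hu
  | case3 visited frontier hf uni hu ih =>
    intro hnd hvk hfv hvr hcl hst
    have hdiff : ∀ x, x ∈ PySem.Set.diff (PySem.Set.ofList uni) visited ↔
        x ∈ PySem.Set.ofList uni ∧ x ∉ visited := fun x => PySem.Set.mem_diff _ _ _
    have hupd : ∀ x, x ∈ PySem.Set.update visited (PySem.Set.diff (PySem.Set.ofList uni) visited) ↔
        x ∈ visited ∨ x ∈ PySem.Set.diff (PySem.Set.ofList uni) visited :=
      fun x => PySem.Set.mem_update _ _ _
    have huniK : ∀ x ∈ uni, x ∈ graph.map Prod.fst := by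
      intro x hx
      obtain ⟨v, _, ns, hns, hxns⟩ := pvNbrsSound hu x hx
      exact hpre _ (pvLookupMem hns) x hxns
    have huniR : ∀ x ∈ uni, pvReach graph start x := by
      intro x hx
      obtain ⟨v, hv, ns, hns, hxns⟩ := pvNbrsSound hu x hx
      exact pvReach.step (hvr v (hfv v hv)) hns hxns
    have hgoal : loopB graph visited frontier =
        loopB graph (PySem.Set.update visited (PySem.Set.diff (PySem.Set.ofList uni) visited))
          (PySem.Set.diff (PySem.Set.ofList uni) visited) := by
      rw [loopB, if_neg hf]
      split
      · simp_all
      · rename_i uni' hu'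
        rw [hu] at hu'
        injection hu' with e
        subst e
        rfl
    rw [hgoal]
    apply ih
    · exact PySem.Set.nodup_update _ _ hnd
    · intro x hx
      rcases (hupd x).1 hx with h | h
      · exact hvk x h
      · exact huniK x ((PySem.Set.mem_ofList _ _).1 ((hdiff x).1 h).1)
    · intro x hx
      exact (hupd x).2 (Or.inr hx)
    · intro x hx
      rcases (hupd x).1 hx with h | h
      · exact hvr x h
      · exact huniR x ((PySem.Set.mem_ofList _ _).1 ((hdiff x).1 h).1)
    · intro v hv ns hns n hn
      rcases (hupd v).1 hv with h | h
      · rcases hcl v h ns hns n hn with h2 | h2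
        · exact Or.inl ((hupd n).2 (Or.inl h2))
        · have hnu : n ∈ uni := pvNbrsComplete hu v h2 ns hns n hn
          by_cases hnv : n ∈ visited
          · exact Or.inl ((hupd n).2 (Or.inl hnv))
          · exact Or.inl ((hupd n).2 (Or.inr
              ((hdiff n).2 ⟨(PySem.Set.mem_ofList _ _).2 hnu, hnv⟩)))
      · exact Or.inr h
    · exact (hupd start).2 (Or.inl hst)

theorem pvReachSubset {graph : List (String × List String)} {start : String} {r : List String}
    (hs : start ∈ r)
    (hc : ∀ v ∈ r, ∀ ns, List.lookup v graph = some ns → ∀ n ∈ ns, n ∈ r) :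
    ∀ x, pvReach graph start x → x ∈ r := by
  intro x hx
  induction hx with
  | base => exact hs
  | step hu hl hn ih => exact hc _ ih _ hl _ hn

-- ===== VERDICT (by name: the statement is the Claim_ definition above) =====
theorem getMaxSubtree_spec : Claim_equal_getMaxSubtree := by
  intro graph start _ hpre
  unfold Spec_getMaxSubtree getMaxSubtree getMaxSubtree_alt
  obtain ⟨hndA, hsndA, hstA, hclA⟩ :=
    loopA_inv graph start hpre.2 [] [start] (by simp) (by simp)
      (by intro x hx; simp at hx; subst hx; exact hpre.1)
      (by simp) (by intro x hx; simp at hx; subst hx; exact pvReach.base)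
      (by simp) (Or.inr (List.mem_cons_self ..))
  obtain ⟨hndB, hsndB, hstB, hclB⟩ :=
    loopB_inv graph start hpre.2 [start] [start] (by simp)
      (by intro x hx; simp at hx; subst hx; exact hpre.1)
      (fun x hx => hx)
      (by intro x hx; simp at hx; subst hx; exact pvReach.base)
      (by intro v hv ns hns n hn; exact Or.inr hv)
      (List.mem_cons_self ..)
  have hperm : (loopA graph [] [start]).Perm (loopB graph [start] [start]) := by
    rw [List.perm_ext_iff_of_nodup hndA hndB]
    intro a
    constructor
    · intro ha; exact pvReachSubset hstB hclB a (hsndA a ha)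
    · intro ha; exact pvReachSubset hstA hclA a (hsndB a ha)
  exact PySem.List.sorted_eq_sorted_of_perm _ _ _ (fun a b h => h) hperm
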